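-- pv_equiv track=rewrite | github.com/kuan0020/quickzoom | automate.py | sliceLastOccur
-- ===== SOURCE A (Python) =====
-- def sliceLastOccur(string, char):
--     res = ''
--     i = 0
--
--     while(i < len(string)):
--         if(string[i] == char):
--             res = string[0:i]
--         i += 1
--     return res
-- ===== SOURCE B (Python) =====
-- def sliceLastOccur(string, char):
--     for i in range(len(string) - 1, -1, -1):
--         if string[i] == char:
--             return string[0:i]
--     return ''
-- ===== Notes on version B (the rewrite author's own statement) =====
-- stated objective: alternative
-- what changed: B scans the string backwards and returns string[0:i] at the first (i.e. last-overall) match, instead of A's forward scan that overwrites the accumulated prefix on every match.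
import Mathlib
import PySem

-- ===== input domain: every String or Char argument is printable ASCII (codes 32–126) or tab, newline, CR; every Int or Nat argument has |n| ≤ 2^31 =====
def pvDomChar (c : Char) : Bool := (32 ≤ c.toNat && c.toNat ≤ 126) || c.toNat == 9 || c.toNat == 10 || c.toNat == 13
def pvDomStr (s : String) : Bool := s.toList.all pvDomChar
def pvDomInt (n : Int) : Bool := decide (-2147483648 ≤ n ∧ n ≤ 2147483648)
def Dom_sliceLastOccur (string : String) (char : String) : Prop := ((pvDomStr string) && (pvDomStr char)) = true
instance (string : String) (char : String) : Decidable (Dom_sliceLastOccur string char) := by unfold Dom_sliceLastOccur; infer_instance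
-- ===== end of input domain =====

-- B replaces A's accumulate-on-every-match forward scan by a backward scan that
-- returns at the last occurrence (objective: alternative decomposition, same cost).

-- ===== PORT A =====
-- A: res = ''; forward while-loop over i = 0..len-1, res := string[0:i] whenever
-- string[i] == char.  Ported as a foldl over the index range with accumulator res;
-- string[i] (a 1-char Python string) is (s.drop i).take 1 for i < length.
def sliceLastOccur (string : String) (char : String) : String :=
  let s := string.toList
  (List.range s.length).foldl
    (fun res i => if String.ofList ((s.drop i).take 1) = char then String.ofList (s.take i) else res)
    ""

-- ===== PORT B =====
-- B: for i in range(len-1, -1, -1): if string[i] == char: return string[0:i]; return ''.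
-- Ported as a structural recursion on the counter i+1 (i is the current index).
def sliceLastOccurAltGo (s : List Char) (char : String) : Nat → String
  | 0 => ""
  | i + 1 =>
    if String.ofList ((s.drop i).take 1) = char then String.ofList (s.take i)
    else sliceLastOccurAltGo s char i

def sliceLastOccur_alt (string : String) (char : String) : String :=
  sliceLastOccurAltGo string.toList char string.toList.length

-- ===== PRECONDITION & SPEC =====
def Spec_sliceLastOccur (string : String) (char : String) (out : String) : Prop := out = sliceLastOccur_alt string char
instance (string : String) (char : String) (out : String) : Decidable (Spec_sliceLastOccur string char out) := by unfold Spec_sliceLastOccur; infer_instance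

-- ===== CLAIM (what is proved, stated in full; the proofs are below) =====
def Claim_equal_sliceLastOccur : Prop := ∀ (string : String) (char : String), Dom_sliceLastOccur string char → Spec_sliceLastOccur string char (sliceLastOccur string char)

-- ===== LEMMAS AND PROOFS =====

-- The forward fold over range n equals the backward early-return scan from index n-1.
theorem sliceLastOccur_fold_eq_go (s : List Char) (char : String) (n : Nat) :
    (List.range n).foldl
      (fun res i => if String.ofList ((s.drop i).take 1) = char then String.ofList (s.take i) else res)
      "" = sliceLastOccurAltGo s char n := by
  induction n with
  | zero => rfl
  | succ n ih =>
    rw [List.range_succ, List.foldl_append, ih]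
    simp only [List.foldl_cons, List.foldl_nil, sliceLastOccurAltGo]

-- ===== VERDICT (by name: the statement is the Claim_ definition above) =====
theorem sliceLastOccur_spec : Claim_equal_sliceLastOccur := by
  intro string char _
  unfold Spec_sliceLastOccur sliceLastOccur sliceLastOccur_alt
  exact sliceLastOccur_fold_eq_go string.toList char string.toList.length
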